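-- pv_equiv track=rewrite | github.com/hoidn/UW-XAP | dataccess/dataccess/lp70.py | make_event_mask
-- ===== SOURCE A (Python) =====
-- def make_event_mask(runs, events_included, max_events = 1000):
--     """
--     Given a list of run numbers, and a list of list of event numbers to be included for each
--     run, return an event mask.
--     """
--     mask = {}
--     for r, events in zip(runs, events_included):
--         mask[r] = {}
--         for i in range(max_events):
--             if i in events:
--                 mask[r][i] = True
--             else:
--                 mask[r][i] = False
--     return mask
-- ===== SOURCE B (Python) =====
-- def make_event_mask(runs, events_included, max_events = 1000):
--     """
--     Given a list of run numbers, and a list of list of event numbers to be included for each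
--     run, return an event mask.
--     """
--     def row(events):
--         # sorted distinct in-range events, then one merge pass against range(max_events)
--         v = sorted({e for e in events if 0 <= e < max_events})
--         d = {}
--         k = 0
--         for i in range(max_events):
--             hit = k < len(v) and v[k] == i
--             if hit:
--                 k += 1
--             d[i] = hit
--         return d
--     return {r: row(ev) for r, ev in zip(runs, events_included)}
-- ===== Notes on version B (the rewrite author's own statement) =====
-- stated objective: faster
-- what changed: Per run, B sorts the distinct in-range events and builds the row in a single merge pass of a pointer over range(max_events), instead of A's membership scan of the events list at every index.
import Mathlib
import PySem

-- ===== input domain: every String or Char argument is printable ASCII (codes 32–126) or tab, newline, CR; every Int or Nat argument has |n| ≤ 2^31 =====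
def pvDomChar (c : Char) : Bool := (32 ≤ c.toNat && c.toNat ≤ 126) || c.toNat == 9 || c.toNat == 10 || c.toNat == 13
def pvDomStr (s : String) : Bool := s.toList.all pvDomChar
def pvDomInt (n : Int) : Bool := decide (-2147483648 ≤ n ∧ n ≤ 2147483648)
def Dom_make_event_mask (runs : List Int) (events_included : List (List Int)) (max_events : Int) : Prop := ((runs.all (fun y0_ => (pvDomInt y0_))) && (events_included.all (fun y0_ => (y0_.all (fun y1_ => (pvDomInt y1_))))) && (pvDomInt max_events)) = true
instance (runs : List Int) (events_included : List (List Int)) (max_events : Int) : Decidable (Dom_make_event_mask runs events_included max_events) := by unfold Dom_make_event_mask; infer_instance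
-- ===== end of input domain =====

-- B builds each run's row by sorting the distinct in-range events and merging a pointer
-- against range(max_events), instead of A's membership scan at every index (objective: faster).

-- ===== PORT A =====
-- inner loop of A: for i in range(max_events): mask[r][i] = (i in events)
def pvInnerA (events : List Int) (max_events : Int) : PySem.Dict Int Bool :=
  (PySem.List.pyRange 0 max_events 1).foldl
    (fun d i => d.insert i (decide (i ∈ events))) PySem.Dict.empty

def make_event_mask (runs : List Int) (events_included : List (List Int)) (max_events : Int) : List (Int × List (Int × Bool)) :=
  (((runs.zip events_included).foldl
      (fun mask p => mask.insert p.1 (pvInnerA p.2 max_events))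
      PySem.Dict.empty).items).map (fun q => (q.1, q.2.items))

-- ===== PORT B =====
-- v = sorted({e for e in events if 0 <= e < max_events})
def pvSorted (events : List Int) (max_events : Int) : List Int :=
  PySem.List.sorted (PySem.Set.ofList (events.filter (fun e => decide (0 ≤ e ∧ e < max_events)))) (fun x => x) false

-- row(events): one merge pass of pointer k over range(max_events).  'v[k]' is guarded by
-- 'k < len(v)' in the Python (short-circuit 'and'), so the total pyGetD with default 0 is exact.
def pvRowB (events : List Int) (max_events : Int) : PySem.Dict Int Bool :=
  ((PySem.List.pyRange 0 max_events 1).foldl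
      (fun (st : PySem.Dict Int Bool × Int) i =>
        let hit : Bool := decide (st.2 < ((pvSorted events max_events).length : Int)) &&
          decide (PySem.List.pyGetD (pvSorted events max_events) st.2 0 = i)
        (st.1.insert i hit, if hit then st.2 + 1 else st.2))
      (PySem.Dict.empty, 0)).1

-- {r: row(ev) for r, ev in zip(runs, events_included)}: evaluate each pair, insert in order
def make_event_mask_alt (runs : List Int) (events_included : List (List Int)) (max_events : Int) : List (Int × List (Int × Bool)) :=
  ((((runs.zip events_included).map (fun p => (p.1, pvRowB p.2 max_events))).foldl
      (fun mask q => mask.insert q.1 q.2)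
      PySem.Dict.empty).items).map (fun q => (q.1, q.2.items))

-- ===== PRECONDITION & SPEC =====
def Spec_make_event_mask (runs : List Int) (events_included : List (List Int)) (max_events : Int) (out : List (Int × List (Int × Bool))) : Prop := out = make_event_mask_alt runs events_included max_events
instance (runs : List Int) (events_included : List (List Int)) (max_events : Int) (out : List (Int × List (Int × Bool))) : Decidable (Spec_make_event_mask runs events_included max_events out) := by unfold Spec_make_event_mask; infer_instance

-- ===== CLAIM (what is proved, stated in full; the proofs are below) =====
def Claim_equal_make_event_mask : Prop := ∀ (runs : List Int) (events_included : List (List Int)) (max_events : Int), Dom_make_event_mask runs events_included max_events → Spec_make_event_mask runs events_included max_events (make_event_mask runs events_included max_events)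

-- ===== LEMMAS AND PROOFS =====

-- A's inner loop builds the items list (i, i ∈ events) over range(0, m)
theorem pv_innerA_items (events : List Int) (m : Int) :
    (pvInnerA events m).items
      = (PySem.List.pyRange 0 m 1).map (fun i => (i, decide (i ∈ events))) := by
  unfold pvInnerA
  rw [PySem.Dict.items_foldl_insert_fresh (k := fun i => i) (v := fun i => decide (i ∈ events))
        (d := PySem.Dict.empty) (l := PySem.List.pyRange 0 m 1)
        (fun a _ => PySem.Dict.contains_empty a)
        (by simpa using PySem.List.nodup_pyRange_one 0 m)]
  simp [PySem.Dict.empty]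

-- B's merge pass: with the sorted list v fixed, folding the pointer loop over range(lo, lo+n)
-- appends, key by key, the pair (i, i ∈ v.drop kn)
theorem pv_merge_loop (v : List Int) (hv : v.Pairwise (· < ·)) :
    ∀ (n : Nat) (lo : Int) (d : PySem.Dict Int Bool) (kn : Nat),
      (∀ e ∈ v.drop kn, lo ≤ e) →
      (∀ key ∈ d.keys, key < lo) →
      (((PySem.List.pyRange lo (lo + (n : Int)) 1).foldl
          (fun (st : PySem.Dict Int Bool × Int) i =>
            let hit : Bool := decide (st.2 < (v.length : Int)) && decide (PySem.List.pyGetD v st.2 0 = i)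
            (st.1.insert i hit, if hit then st.2 + 1 else st.2))
          (d, (kn : Int))).1).items
        = d.items ++ (PySem.List.pyRange lo (lo + (n : Int)) 1).map
            (fun i => (i, decide (i ∈ v.drop kn))) := by
  intro n
  induction n with
  | zero =>
    intro lo d kn _ _
    rw [PySem.List.pyRange_one_eq_nil (by omega)]
    simp
  | succ n ih =>
    intro lo d kn hlb hkeys
    have hlt : lo < lo + ((n + 1 : Nat) : Int) := by push_cast; omega
    rw [PySem.List.pyRange_one_cons hlt]
    have hrange : lo + ((n + 1 : Nat) : Int) = (lo + 1) + (n : Int) := by push_cast; ring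
    have hfresh : d.contains lo = false := by
      by_contra h
      have h' : d.contains lo = true := by revert h; cases d.contains lo <;> simp
      rw [PySem.Dict.contains_iff_mem_keys] at h'
      exact absurd (hkeys lo h') (by omega)
    have hpw : (v.drop kn).Pairwise (· < ·) := hv.sublist (List.drop_sublist kn v)
    by_cases hmem : lo ∈ v.drop kn
    · -- hit: head of the remaining sorted events is lo
      have hkn : kn < v.length := by
        by_contra h
        rw [List.drop_eq_nil_iff.mpr (by omega)] at hmem
        simp at hmem
      have hdrop : v.drop kn = v[kn] :: v.drop (kn + 1) := List.drop_eq_getElem_cons hkn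
      have hhead : v[kn] = lo := by
        rw [hdrop] at hmem hpw
        rcases List.mem_cons.mp hmem with h | h
        · exact h.symm
        · exact absurd ((List.pairwise_cons.mp hpw).1 lo h)
            (by have := hlb v[kn] (by rw [hdrop]; exact List.mem_cons_self); omega)
      have hg : PySem.List.pyGetD v (kn : Int) 0 = v[kn] := by
        simp [PySem.List.pyGetD_natCast, hkn]
      have hhit : (decide ((kn : Int) < (v.length : Int)) &&
          decide (PySem.List.pyGetD v (kn : Int) 0 = lo)) = true := by
        simp [hg, hhead, hkn]
      simp only [List.foldl_cons, hhit, if_true]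
      have hkcast : (kn : Int) + 1 = ((kn + 1 : Nat) : Int) := by push_cast; ring
      rw [hkcast, hrange]
      rw [ih (lo + 1) (d.insert lo true) (kn + 1)
        (by
          intro e he
          have h1 : v[kn] < e := (List.pairwise_cons.mp (hdrop ▸ hpw)).1 e he
          omega)
        (by
          intro key hk
          rw [PySem.Dict.mem_keys_insert] at hk
          rcases hk with h | h
          · omega
          · have := hkeys key h; omega)]
      rw [PySem.Dict.items_insert_of_not_contains (h := hfresh)]
      have hself : decide (lo ∈ v.drop kn) = true := by simp [hmem]
      have hmapeq : (PySem.List.pyRange (lo + 1) ((lo + 1) + (n : Int)) 1).map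
            (fun i => (i, decide (i ∈ v.drop (kn + 1))))
          = (PySem.List.pyRange (lo + 1) ((lo + 1) + (n : Int)) 1).map
            (fun i => (i, decide (i ∈ v.drop kn))) := by
        refine List.map_congr_left (fun i hi => ?_)
        have hi' := (PySem.List.mem_pyRange_one).1 hi
        have hiff : (i ∈ v.drop (kn + 1)) ↔ (i ∈ v.drop kn) := by
          rw [hdrop, List.mem_cons, hhead]
          constructor
          · exact Or.inr
          · rintro (h | h)
            · omega
            · exact h
        simp [hiff]
      rw [hmapeq, List.map_cons, hself, List.append_assoc]
      simp
    · -- no hit: either the pointer is exhausted or it points past lo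
      have hhit : (decide ((kn : Int) < (v.length : Int)) &&
          decide (PySem.List.pyGetD v (kn : Int) 0 = lo)) = false := by
        by_cases hkn : kn < v.length
        · have hdrop : v.drop kn = v[kn] :: v.drop (kn + 1) := List.drop_eq_getElem_cons hkn
          have hg : PySem.List.pyGetD v (kn : Int) 0 = v[kn] := by
            simp [PySem.List.pyGetD_natCast, hkn]
          have hne : v[kn] ≠ lo := fun h => hmem (h ▸ (hdrop ▸ List.mem_cons_self))
          simp [hg, hne]
        · have hnl : ¬ ((kn : Int) < (v.length : Int)) := by exact_mod_cast hkn
          simp [hnl]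
      simp only [List.foldl_cons, hhit, Bool.false_eq_true, if_false]
      rw [hrange]
      rw [ih (lo + 1) (d.insert lo false) kn
        (by
          intro e he
          have h1 := hlb e he
          have h2 : e ≠ lo := by rintro rfl; exact hmem he
          omega)
        (by
          intro key hk
          rw [PySem.Dict.mem_keys_insert] at hk
          rcases hk with h | h
          · omega
          · have := hkeys key h; omega)]
      rw [PySem.Dict.items_insert_of_not_contains (h := hfresh)]
      have hself : decide (lo ∈ v.drop kn) = false := by simp [hmem]
      rw [List.map_cons, hself, List.append_assoc]
      simp

-- the two inner builds agree for every events list and bound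
theorem pv_inner_eq (events : List Int) (m : Int) :
    pvInnerA events m = pvRowB events m := by
  apply PySem.Dict.ext
  rw [pv_innerA_items]
  unfold pvRowB
  have hv : (pvSorted events m).Pairwise (· < ·) := PySem.List.sorted_ofList_pairwise_lt _
  have hmemv : ∀ i : Int, i ∈ pvSorted events m ↔ (0 ≤ i ∧ i < m ∧ i ∈ events) := by
    intro i
    rw [pvSorted, PySem.List.mem_sorted, PySem.Set.mem_ofList, List.mem_filter]
    simp; tauto
  by_cases hm : m ≤ 0
  · rw [PySem.List.pyRange_one_eq_nil hm]
    simp [PySem.Dict.empty]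
  · have hm' : (0 : Int) + ((m.toNat : Nat) : Int) = m := by omega
    have hml := pv_merge_loop (pvSorted events m) hv m.toNat 0 PySem.Dict.empty 0
        (by intro e he; have := (hmemv e).1 (by simpa using he); omega)
        (by intro key hk; simp [PySem.Dict.keys, PySem.Dict.empty] at hk)
    simp only [Nat.cast_zero, List.drop_zero] at hml
    rw [hm'] at hml
    rw [hml]
    simp only [PySem.Dict.empty, List.nil_append]
    refine List.map_congr_left (fun i hi => ?_)
    have hi' := (PySem.List.mem_pyRange_one).1 hi
    have hiff : i ∈ pvSorted events m ↔ i ∈ events := by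
      rw [hmemv i]
      exact Iff.intro (fun h => h.2.2) (fun h => ⟨by omega, by omega, h⟩)
    simp [hiff]

-- ===== VERDICT (by name: the statement is the Claim_ definition above) =====
theorem make_event_mask_spec : Claim_equal_make_event_mask := by
  intro runs events_included max_events _
  unfold Spec_make_event_mask make_event_mask make_event_mask_alt
  rw [List.foldl_map]
  have hstep : (fun (mask : PySem.Dict Int (PySem.Dict Int Bool)) (p : Int × List Int) =>
        mask.insert p.1 (pvInnerA p.2 max_events))
      = (fun mask p => mask.insert (p.1, pvRowB p.2 max_events).1 (p.1, pvRowB p.2 max_events).2) := by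
    funext mask p; rw [pv_inner_eq]
  rw [hstep]
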